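-- pv_equiv track=rewrite | github.com/wizard9582/Algo | Programmers/Python/q1845_Programmers_폰켓몬.py | solution_with_dict
-- ===== SOURCE A (Python) =====
-- def solution_with_dict(nums):
--     answer = 0
--     count = len(nums) // 2
--     picked = {}
--
--     index = 0
--     while answer < count and index < len(nums):
--         if not nums[index] in picked:
--             picked[nums[index]] = 1
--             answer += 1
--         index += 1
--
--     return answer
-- ===== SOURCE B (Python) =====
-- def solution_with_dict(nums):
--     return min(len(nums) // 2, len(set(nums)))
-- ===== Notes on version B (the rewrite author's own statement) =====
-- stated objective: simpler
-- what changed: Replaced the early-exit while loop with an incremental membership dict by the closed form min(len(nums)//2, len(set(nums))).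
import Mathlib
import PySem

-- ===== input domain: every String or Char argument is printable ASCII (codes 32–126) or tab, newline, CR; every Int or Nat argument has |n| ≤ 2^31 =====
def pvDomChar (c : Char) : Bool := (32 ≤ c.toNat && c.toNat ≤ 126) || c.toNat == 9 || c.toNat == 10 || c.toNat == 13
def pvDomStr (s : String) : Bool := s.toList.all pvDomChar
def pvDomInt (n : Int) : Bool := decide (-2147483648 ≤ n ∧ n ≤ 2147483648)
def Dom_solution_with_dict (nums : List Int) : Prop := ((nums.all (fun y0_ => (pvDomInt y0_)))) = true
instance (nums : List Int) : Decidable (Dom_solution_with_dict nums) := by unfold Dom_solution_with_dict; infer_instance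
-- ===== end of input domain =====

-- B replaces A's early-exit while loop over an incremental membership dict by the
-- closed form min(len(nums)//2, len(set(nums))) (objective: simpler).

-- ===== PORT A =====
-- The while loop: structural recursion over the remaining list, carrying answer and picked.
def pvGoA : List Int → Int → Int → PySem.Dict Int Int → Int
  | [], _, answer, _ => answer
  | x :: xs, count, answer, picked =>
    if answer < count then
      if picked.contains x then pvGoA xs count answer picked
      else pvGoA xs count (answer + 1) (picked.insert x 1)
    else answer

def solution_with_dict (nums : List Int) : Int :=
  pvGoA nums (PySem.Int.floordiv (nums.length : Int) 2) 0 PySem.Dict.empty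

-- ===== PORT B =====
def solution_with_dict_alt (nums : List Int) : Int :=
  min (PySem.Int.floordiv (nums.length : Int) 2) ((PySem.Set.ofList nums).length : Int)

-- ===== PRECONDITION & SPEC =====
def Spec_solution_with_dict (nums : List Int) (out : Int) : Prop := out = solution_with_dict_alt nums
instance (nums : List Int) (out : Int) : Decidable (Spec_solution_with_dict nums out) := by unfold Spec_solution_with_dict; infer_instance

-- ===== CLAIM (what is proved, stated in full; the proofs are below) =====
def Claim_equal_solution_with_dict : Prop := ∀ (nums : List Int), Dom_solution_with_dict nums → Spec_solution_with_dict nums (solution_with_dict nums)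

-- ===== LEMMAS AND PROOFS =====

theorem pvSet_length_le_update (xs : List Int) : ∀ (s : PySem.Set Int),
    s.length ≤ (PySem.Set.update s xs).length := by
  induction xs with
  | nil => intro s; simp [PySem.Set.update]
  | cons x xs ih =>
      intro s
      rw [PySem.Set.update_cons]
      refine le_trans ?_ (ih (PySem.Set.add s x))
      rw [PySem.Set.add_eq_ite]
      split <;> simp

theorem pvGoA_eq (xs : List Int) : ∀ (count answer : Int) (picked : PySem.Dict Int Int),
    answer ≤ count →
    pvGoA xs count answer picked
      = min count (answer + (((PySem.Set.update picked.keys xs).length : Int) - (picked.keys.length : Int))) := by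
  induction xs with
  | nil =>
      intro count answer picked h
      simp [pvGoA, PySem.Set.update, h]
  | cons x xs ih =>
      intro count answer picked h
      rw [PySem.Set.update_cons]
      by_cases hlt : answer < count
      · by_cases hc : picked.contains x = true
        · have hmem : x ∈ picked.keys := (PySem.Dict.contains_iff_mem_keys picked x).mp hc
          simp only [pvGoA, hlt, if_true, hc]
          rw [ih count answer picked h, PySem.Set.add_of_mem hmem]
        · have hmem : x ∉ picked.keys := fun hm =>
            hc ((PySem.Dict.contains_iff_mem_keys picked x).mpr hm)
          simp only [pvGoA, hlt, if_true, hc]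
          rw [ih count (answer + 1) (picked.insert x 1) (by omega),
              PySem.Dict.keys_insert_of_not_contains picked (1 : Int) (by simpa using hc),
              PySem.Set.add_of_not_mem hmem]
          simp only [List.length_append, List.length_cons, List.length_nil]
          push_cast
          omega
      · have heq : answer = count := le_antisymm h (by omega)
        have hle := pvSet_length_le_update xs (PySem.Set.add picked.keys x)
        have hle2 : picked.keys.length ≤ (PySem.Set.add picked.keys x).length := by
          rw [PySem.Set.add_eq_ite]; split <;> simp
        simp only [pvGoA, hlt, if_false]
        subst heq
        have : (answer : Int) + (((PySem.Set.update (PySem.Set.add picked.keys x) xs).length : Int) - (picked.keys.length : Int)) ≥ answer := by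
          have := le_trans hle2 hle
          omega
        omega

theorem pvFloordiv_nonneg (n : Nat) : 0 ≤ PySem.Int.floordiv (n : Int) 2 := by
  rw [PySem.Int.floordiv_eq_ediv_of_pos (by norm_num)]
  exact Int.ediv_nonneg (by positivity) (by norm_num)

-- ===== VERDICT (by name: the statement is the Claim_ definition above) =====
theorem solution_with_dict_spec : Claim_equal_solution_with_dict := by
  intro nums _
  unfold Spec_solution_with_dict solution_with_dict solution_with_dict_alt
  rw [pvGoA_eq nums _ 0 PySem.Dict.empty (pvFloordiv_nonneg nums.length)]
  simp [PySem.Dict.keys_empty, PySem.Set.update_nil_left]
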